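-- pv_equiv track=rewrite | github.com/hienpham15/Codeforces_competitions | Codeforces_round708/A_Meximization.py | func
-- ===== SOURCE A (Python) =====
-- from collections import Counter
--
-- def func(array):
--     sorted_array = sorted(array)
--
--     new_array = []
--     sup_array = []
--     for item, count in Counter(sorted_array).items():
--         new_array.append(item)
--         if count > 1:
--             sup_array.append(item)
--
--     final_array = new_array + sup_array
--     return final_array
-- ===== SOURCE B (Python) =====
-- def func(array):
--     seen = set()
--     dups = set()
--     for item in array:
--         if item in seen:
--             dups.add(item)
--         else:
--             seen.add(item)
--     return sorted(seen) + sorted(dups)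
-- ===== Notes on version B (the rewrite author's own statement) =====
-- stated objective: alternative
-- what changed: B never sorts the whole array and never builds a Counter: one pass over the unsorted input partitions values into a 'seen' set and a 'duplicated' set, then each (much smaller) set is sorted independently and concatenated.
import Mathlib
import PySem

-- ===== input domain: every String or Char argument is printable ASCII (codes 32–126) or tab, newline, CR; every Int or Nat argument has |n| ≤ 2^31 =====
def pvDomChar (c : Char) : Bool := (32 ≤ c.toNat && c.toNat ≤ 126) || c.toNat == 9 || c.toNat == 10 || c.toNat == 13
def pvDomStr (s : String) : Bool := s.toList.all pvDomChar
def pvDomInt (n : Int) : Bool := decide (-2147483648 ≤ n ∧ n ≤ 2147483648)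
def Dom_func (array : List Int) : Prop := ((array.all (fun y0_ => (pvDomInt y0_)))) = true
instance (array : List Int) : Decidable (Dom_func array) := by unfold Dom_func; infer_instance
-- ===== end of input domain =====

-- B replaces A's sort-whole-array-then-Counter pipeline by a single unsorted pass with two
-- sets (seen / duplicated), sorting only the distinct values (objective: alternative).

-- ===== PORT A =====
-- for item, count in Counter(sorted_array).items(): append item; if count > 1 append item to sup
def func (array : List Int) : List Int :=
  let sorted_array := PySem.List.sorted array (fun x => x) false
  let st := (PySem.Dict.counter sorted_array).items.foldl
    (fun (st : List Int × List Int) (ic : Int × Int) =>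
      (st.1 ++ [ic.1], if ic.2 > 1 then st.2 ++ [ic.1] else st.2))
    ([], [])
  st.1 ++ st.2

-- ===== PORT B =====
-- the one pass of Source B: (seen, dups) updated per element
def pvLoop (array : List Int) : PySem.Set Int × PySem.Set Int :=
  array.foldl
    (fun (st : PySem.Set Int × PySem.Set Int) item =>
      if PySem.Set.contains st.1 item then (st.1, PySem.Set.add st.2 item)
      else (PySem.Set.add st.1 item, st.2))
    (PySem.Set.empty, PySem.Set.empty)

def func_alt (array : List Int) : List Int :=
  PySem.List.sorted (pvLoop array).1 (fun x => x) false ++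
    PySem.List.sorted (pvLoop array).2 (fun x => x) false

-- ===== PRECONDITION & SPEC =====
def Spec_func (array : List Int) (out : List Int) : Prop := out = func_alt array
instance (array : List Int) (out : List Int) : Decidable (Spec_func array out) := by unfold Spec_func; infer_instance

-- ===== CLAIM (what is proved, stated in full; the proofs are below) =====
def Claim_equal_func : Prop := ∀ (array : List Int), Dom_func array → Spec_func array (func array)

-- ===== LEMMAS AND PROOFS =====

-- A's fold over the counter items list (a list of (key, count) pairs) appends keys / filtered keys
theorem pvFoldA (l : List Int) (cnt : Int → Int) (u d : List Int) :
    ((l.map (fun k => (k, cnt k))).foldl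
      (fun (st : List Int × List Int) (ic : Int × Int) =>
        (st.1 ++ [ic.1], if ic.2 > 1 then st.2 ++ [ic.1] else st.2)) (u, d))
    = (u ++ l, d ++ l.filter (fun k => decide (cnt k > 1))) := by
  induction l generalizing u d with
  | nil => simp
  | cons x xs ih =>
    simp only [List.map_cons, List.foldl_cons, List.filter_cons, ih]
    by_cases h : cnt x > 1 <;> simp [h]

-- A computed in closed form
theorem pvFuncChar (array : List Int) :
    func array =
      PySem.Set.ofList (PySem.List.sorted array (fun x => x) false) ++
        (PySem.Set.ofList (PySem.List.sorted array (fun x => x) false)).filter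
          (fun k => decide (((PySem.List.sorted array (fun x => x) false).count k : Int) > 1)) := by
  unfold func
  simp only [PySem.Dict.items_counter]
  rw [pvFoldA]
  simp

-- abbreviation for B's loop step
def pvStep (st : PySem.Set Int × PySem.Set Int) (item : Int) : PySem.Set Int × PySem.Set Int :=
  if PySem.Set.contains st.1 item then (st.1, PySem.Set.add st.2 item)
  else (PySem.Set.add st.1 item, st.2)

theorem pvFoldFst (l : List Int) (s d : List Int) :
    (l.foldl pvStep (s, d)).1 = l.foldl PySem.Set.add s := by
  induction l generalizing s d with
  | nil => rfl
  | cons x t ih =>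
    by_cases h : x ∈ s
    · simp [pvStep, h, ih]
    · simp [pvStep, h, ih]

theorem pvFoldSndMem (l : List Int) (s d : List Int) (y : Int) :
    y ∈ (l.foldl pvStep (s, d)).2 ↔ y ∈ d ∨ (y ∈ l ∧ (y ∈ s ∨ 2 ≤ l.count y)) := by
  induction l generalizing s d with
  | nil => simp
  | cons x t ih =>
    have hcnt : (x :: t).count y = t.count y + (if x = y then 1 else 0) := by
      simp [List.count_cons]
    have hmem : y ∈ t ↔ 0 < t.count y := List.count_pos_iff.symm
    by_cases h : x ∈ s
    · rw [show (x :: t).foldl pvStep (s, d) = t.foldl pvStep (s, PySem.Set.add d x) by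
        simp [pvStep, h]]
      rw [ih, hcnt]
      simp only [PySem.Set.mem_add d x y, List.mem_cons]
      by_cases hyx : y = x
      · subst hyx
        constructor
        · intro _; exact Or.inr ⟨Or.inl rfl, Or.inl h⟩
        · intro _; exact Or.inl (Or.inr rfl)
      · have hzero : (if x = y then (1:Nat) else 0) = 0 := if_neg (fun hh => hyx hh.symm)
        rw [hzero, add_zero]
        simp only [hyx, or_false]
        tauto
    · rw [show (x :: t).foldl pvStep (s, d) = t.foldl pvStep (PySem.Set.add s x, d) by
        simp [pvStep, h]]
      rw [ih, hcnt]
      simp only [PySem.Set.mem_add s x y, List.mem_cons]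
      by_cases hyx : y = x
      · subst hyx
        have hone : (if y = y then (1:Nat) else 0) = 1 := if_pos rfl
        rw [hone]
        constructor
        · rintro (hd | ⟨hyt, _⟩)
          · exact Or.inl hd
          · have := hmem.mp hyt
            exact Or.inr ⟨Or.inl rfl, Or.inr (by omega)⟩
        · rintro (hd | ⟨_, (hs | hc)⟩)
          · exact Or.inl hd
          · exact absurd hs h
          · exact Or.inr ⟨hmem.mpr (by omega), Or.inl (Or.inr rfl)⟩
      · have hzero : (if x = y then (1:Nat) else 0) = 0 := if_neg (fun hh => hyx hh.symm)
        rw [hzero, add_zero]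
        simp only [hyx, or_false, false_or]

theorem pvFoldSndNodup (l : List Int) (s d : List Int) (hd : d.Nodup) :
    (l.foldl pvStep (s, d)).2.Nodup := by
  induction l generalizing s d with
  | nil => exact hd
  | cons x t ih =>
    by_cases h : x ∈ s
    · rw [show (x :: t).foldl pvStep (s, d) = t.foldl pvStep (s, PySem.Set.add d x) by
        simp [pvStep, h]]
      exact ih _ _ (PySem.Set.nodup_add d x hd)
    · rw [show (x :: t).foldl pvStep (s, d) = t.foldl pvStep (PySem.Set.add s x, d) by
        simp [pvStep, h]]
      exact ih _ _ hd

-- ofList of a list is a sublist of it (hence inherits Pairwise ≤ from a sorted list)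
theorem pvOfListSublist (xs : List Int) : (PySem.Set.ofList xs).Sublist xs := by
  induction xs with
  | nil => simp [PySem.Set.ofList_nil]
  | cons x t ih =>
    rw [PySem.Set.ofList_cons]
    refine List.Sublist.cons₂ x (List.Sublist.trans ?_ ih)
    show (List.filter (fun y => !y == x) (PySem.Set.ofList t)).Sublist (PySem.Set.ofList t)
    exact List.filter_sublist

-- ===== VERDICT (by name: the statement is the Claim_ definition above) =====
theorem func_spec : Claim_equal_func := by
  intro array _
  unfold Spec_func
  rw [pvFuncChar]
  unfold func_alt
  have hloop : pvLoop array = array.foldl pvStep (PySem.Set.empty, PySem.Set.empty) := rfl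
  rw [hloop]
  set sa := PySem.List.sorted array (fun x => x) false with hsa
  set T := PySem.Set.ofList sa with hT
  set D := T.filter (fun k => decide ((sa.count k : Int) > 1)) with hD
  set p := array.foldl pvStep (PySem.Set.empty, PySem.Set.empty) with hp
  -- membership and count transfer between array and its sorted copy
  have hperm : sa.Perm array := PySem.List.sorted_perm array (fun x => x) false
  have hcount : ∀ y : Int, sa.count y = array.count y := fun y => hperm.count_eq y
  have hmemsa : ∀ y : Int, y ∈ sa ↔ y ∈ array := fun y => hperm.mem_iff
  -- T is strictly increasing and nodup
  have hTnodup : T.Nodup := PySem.Set.nodup_ofList sa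
  have hTle : T.Pairwise (· ≤ ·) :=
    (PySem.List.sorted_pairwise array (fun x => x)).sublist (pvOfListSublist sa)
  have hTlt : T.Pairwise (· < ·) :=
    (hTle.and hTnodup).imp (fun h => lt_of_le_of_ne h.1 h.2)
  have hTmem : ∀ y : Int, y ∈ T ↔ y ∈ array := by
    intro y; rw [hT, PySem.Set.mem_ofList]; exact hmemsa y
  -- the first component of B's fold is set(array)
  have hp1 : p.1 = PySem.Set.ofList array := by
    rw [hp, pvFoldFst]
    exact (PySem.Set.ofList_eq_foldl array).symm
  have hp1nodup : p.1.Nodup := by rw [hp1]; exact PySem.Set.nodup_ofList array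
  have hp1mem : ∀ y : Int, y ∈ p.1 ↔ y ∈ array := by
    intro y; rw [hp1, PySem.Set.mem_ofList]
  -- sorted(seen) is exactly A's list of distinct keys
  have h1 : PySem.List.sorted p.1 (fun x => x) false = T := by
    apply PySem.List.sorted_eq_of_perm_of_pairwise_lt
    · exact (List.perm_ext_iff_of_nodup hTnodup hp1nodup).mpr
        (fun y => (hTmem y).trans (hp1mem y).symm)
    · exact hTlt
  -- sorted(dups) is exactly A's list of duplicated keys
  have hDmem : ∀ y : Int, y ∈ D ↔ y ∈ array ∧ 2 ≤ array.count y := by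
    intro y
    rw [hD, List.mem_filter]
    constructor
    · rintro ⟨hyT, hc⟩
      have : (sa.count y : Int) > 1 := of_decide_eq_true hc
      exact ⟨(hTmem y).mp hyT, by rw [← hcount y]; omega⟩
    · rintro ⟨hya, hc⟩
      refine ⟨(hTmem y).mpr hya, decide_eq_true ?_⟩
      rw [hcount y]; omega
  have hp2mem : ∀ y : Int, y ∈ p.2 ↔ y ∈ array ∧ 2 ≤ array.count y := by
    intro y
    rw [hp, pvFoldSndMem]
    constructor
    · rintro (hd | ⟨hya, (hs | hc)⟩)
      · exact absurd hd (List.not_mem_nil)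
      · exact absurd hs (List.not_mem_nil)
      · exact ⟨hya, hc⟩
    · rintro ⟨hya, hc⟩
      exact Or.inr ⟨hya, Or.inr hc⟩
  have hDnodup : D.Nodup := hTnodup.sublist (List.filter_sublist)
  have hDlt : D.Pairwise (· < ·) := hTlt.sublist (List.filter_sublist)
  have h2 : PySem.List.sorted p.2 (fun x => x) false = D := by
    apply PySem.List.sorted_eq_of_perm_of_pairwise_lt
    · exact (List.perm_ext_iff_of_nodup hDnodup
        (pvFoldSndNodup array PySem.Set.empty PySem.Set.empty List.nodup_nil)).mpr
        (fun y => (hDmem y).trans (hp2mem y).symm)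
    · exact hDlt
  rw [h1, h2]
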